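-- pv_equiv track=rewrite | github.com/pypi-data/pypi-mirror-286 | packages/acapy/acapy-1.2.0-py3-none-any.whl/acapy/__init__.py | hex_to_ip_address
-- ===== SOURCE A (Python) =====
-- def hex_to_ip_address(hex_value:int):
--     '''
--     32bitの値をIPアドレス(XXX.XXX.XXX.XXX)形式の文字列に変換する
--     '''
--     hex_value = hex_value & 0xFFFFFFFF #32bitの制限
--
--     # hex_valueをIPaddress("XXX.XX.XXX.XXX")に変換
--     ip_address = ""
--     for i in range(4):
--         address = ( hex_value & ((0xFF << ((3 - i)*8))) ) >> ((3 - i)*8)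
--         ip_address = ip_address + str(address)
--         if i < 3:
--             ip_address = ip_address + "."
--
--     return ip_address
-- ===== SOURCE B (Python) =====
-- def hex_to_ip_address(hex_value: int):
--     '''
--     32bitの値をIPアドレス(XXX.XXX.XXX.XXX)形式の文字列に変換する
--     '''
--     packed = (hex_value & 0xFFFFFFFF).to_bytes(4, "big")
--     return ".".join(map(str, packed))
-- ===== Notes on version B (the rewrite author's own statement) =====
-- stated objective: idiomatic
-- what changed: A extracts the four octets with a hand-written loop of per-iteration shift-and-mask bit arithmetic and manual string/dot concatenation; B has no loop and no bit extraction: it packs the masked value into its big-endian byte representation with int.to_bytes and joins the byte values with dots.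
import Mathlib
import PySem

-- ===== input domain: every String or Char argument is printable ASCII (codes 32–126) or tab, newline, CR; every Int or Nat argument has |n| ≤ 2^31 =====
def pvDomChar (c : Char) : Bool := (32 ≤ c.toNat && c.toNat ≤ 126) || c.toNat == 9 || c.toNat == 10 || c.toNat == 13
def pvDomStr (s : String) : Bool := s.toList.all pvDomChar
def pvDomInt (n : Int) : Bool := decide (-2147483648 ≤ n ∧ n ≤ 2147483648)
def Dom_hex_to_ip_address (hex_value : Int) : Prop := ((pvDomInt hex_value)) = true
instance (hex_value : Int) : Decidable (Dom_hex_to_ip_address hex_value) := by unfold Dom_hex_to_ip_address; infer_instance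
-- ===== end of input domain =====

-- B replaces A's shift-and-mask extraction loop with big-endian int.to_bytes packing plus a
-- "."-join of the byte values (idiomatic, same cost).

-- ===== PORT A =====
def hex_to_ip_address (hex_value : Int) : String :=
  let hv := PySem.Int.band hex_value 4294967295
  (PySem.List.pyRange 0 4 1).foldl (fun ip_address i =>
    -- shift counts (3-i)*8 are nonnegative for i ∈ range(4), so .toNat is exact here
    let address := (PySem.Int.band hv (255 <<< ((3 - i) * 8).toNat)) >>> ((3 - i) * 8).toNat
    let ip1 := ip_address ++ PySem.Int.toStr address
    if i < 3 then ip1 ++ "." else ip1) ""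

-- ===== PORT B =====
-- int.to_bytes with "big" on a nonnegative value: its base-256 digits, most significant first
-- (exact for the masked value, which is nonnegative, hence .toNat is exact).
def toBytesBE : Nat → Nat → List Nat
  | 0, _ => []
  | n + 1, v => toBytesBE n (v / 256) ++ [v % 256]

def hex_to_ip_address_alt (hex_value : Int) : String :=
  let packed := toBytesBE 4 (PySem.Int.band hex_value 4294967295).toNat
  PySem.Str.join "." (packed.map (fun b => PySem.Int.toStr (b : Int)))

-- ===== PRECONDITION & SPEC =====
def Spec_hex_to_ip_address (hex_value : Int) (out : String) : Prop := out = hex_to_ip_address_alt hex_value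
instance (hex_value : Int) (out : String) : Decidable (Spec_hex_to_ip_address hex_value out) := by unfold Spec_hex_to_ip_address; infer_instance

-- ===== CLAIM (what is proved, stated in full; the proofs are below) =====
def Claim_equal_hex_to_ip_address : Prop := ∀ (hex_value : Int), Dom_hex_to_ip_address hex_value → Spec_hex_to_ip_address hex_value (hex_to_ip_address hex_value)

-- ===== LEMMAS AND PROOFS =====

-- A's octet extraction (m & (255 << s)) >> s, on a nonnegative value, is division then mod.
lemma octetN (M s : Nat) :
    (PySem.Int.band (M : Int) ((255 <<< s : Nat) : Int)) >>> ((s : Int)) = ((M / 2 ^ s % 256 : Nat) : Int) := by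
  rw [PySem.Int.band_natCast, Int.shiftRight_natCast,
    Nat.shiftRight_and_distrib, Nat.shiftLeft_shiftRight, Nat.shiftRight_eq_div_pow,
    Nat.and_two_pow_sub_one_eq_mod _ 8]

-- B's "."-join of four octet strings equals A's append chain with dots after the first three.
lemma joinfour (a b c d : String) :
    PySem.Str.join "." [a, b, c, d] = a ++ "." ++ b ++ "." ++ c ++ "." ++ d := by
  simp only [PySem.Str.join, List.map_cons, List.map_nil,
    show ".".toList = ['.'] from rfl,
    PySem.Chars.join_cons_cons, PySem.Chars.join_singleton]
  apply String.toList_injective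
  simp [String.toList_ofList]

-- ===== VERDICT (by name: the statement is the Claim_ definition above) =====
theorem hex_to_ip_address_spec : Claim_equal_hex_to_ip_address := by
  intro hex_value _
  unfold Spec_hex_to_ip_address hex_to_ip_address hex_to_ip_address_alt
  have hm : 0 ≤ PySem.Int.band hex_value 4294967295 := by
    rw [PySem.Int.band_comm]; exact PySem.Int.band_nonneg_of_nonneg_left hex_value (by norm_num)
  obtain ⟨M, hM⟩ : ∃ M : Nat, PySem.Int.band hex_value 4294967295 = (M : Int) :=
    ⟨_, (Int.toNat_of_nonneg hm).symm⟩
  rw [show PySem.List.pyRange 0 4 1 = [0, 1, 2, 3] from rfl]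
  simp only [List.foldl, hM, Int.reduceToNat, Int.reduceSub, Int.reduceMul, Int.toNat_natCast,
    toBytesBE, List.nil_append, List.cons_append,]
  simp only [octetN]
  norm_num [Nat.div_div_eq_div_mul]
  exact (joinfour _ _ _ _).symm
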